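-- pv_equiv track=rewrite | github.com/GSPQQ/labs-aisd | laba5.py | generate_arrays_recursive
-- ===== SOURCE A (Python) =====
-- MAX_ELEMENTS = 8  # Максимальное разрешённое K*T
--
-- def generate_arrays_recursive(K, T):
--     """Рекурсивная генерация всех возможных массивов K×T из чисел 0, 1, 2"""
--     if K * T > MAX_ELEMENTS:
--         raise ValueError(f"Превышен максимальный размер массива {MAX_ELEMENTS} элементов")
--
--     total_elements = K * T
--     arrays = []
--
--     def backtrack(current):
--         if len(current) == total_elements:
--             arrays.append([current[i*T:(i+1)*T] for i in range(K)])
--             return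
--         for num in [0, 1, 2]:
--             backtrack(current + [num])
--
--     backtrack([])
--     return arrays
-- ===== SOURCE B (Python) =====
-- import itertools
--
-- MAX_ELEMENTS = 8  # Максимальное разрешённое K*T
--
-- def generate_arrays_recursive(K, T):
--     """All K×T arrays over {0,1,2}, via itertools.product instead of recursion"""
--     if K * T > MAX_ELEMENTS:
--         raise ValueError(f"Превышен максимальный размер массива {MAX_ELEMENTS} элементов")
--     total_elements = K * T
--     return [[list(t[i*T:(i+1)*T]) for i in range(K)]
--             for t in itertools.product([0, 1, 2], repeat=total_elements)]
-- ===== Notes on version B (the rewrite author's own statement) =====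
-- stated objective: idiomatic
-- what changed: Replaces the nested backtracking helper that mutates an accumulator with a single comprehension over itertools.product([0,1,2], repeat=K*T), reshaping each flat tuple into K rows of length T.
import Mathlib
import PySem

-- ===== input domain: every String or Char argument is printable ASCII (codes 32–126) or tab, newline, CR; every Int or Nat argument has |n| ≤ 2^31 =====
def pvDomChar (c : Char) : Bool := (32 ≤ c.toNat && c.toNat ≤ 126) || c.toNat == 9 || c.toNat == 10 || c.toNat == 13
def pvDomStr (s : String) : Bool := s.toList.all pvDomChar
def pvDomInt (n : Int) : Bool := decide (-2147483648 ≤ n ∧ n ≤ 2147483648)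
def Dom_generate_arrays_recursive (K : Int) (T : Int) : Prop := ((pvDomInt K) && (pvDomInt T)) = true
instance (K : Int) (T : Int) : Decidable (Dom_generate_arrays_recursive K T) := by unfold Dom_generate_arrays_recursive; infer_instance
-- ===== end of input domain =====

-- B replaces A's backtracking closure with a comprehension over itertools.product; same cost, more idiomatic.
-- ===== PORT A =====
-- backtrack(current): fuel-bounded transcription (fuel covers the whole recursion whenever total ≥ 0;
-- for total < 0 Python recurses forever, which Pre_ excludes).
def pvBacktrackA (K T total : Int) : Nat → List Int → List (List (List Int)) → List (List (List Int))
  | 0, _, arrays => arrays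
  | fuel + 1, current, arrays =>
    if (current.length : Int) = total then
      arrays ++ [(PySem.List.pyRange 0 K 1).map
        (fun i => PySem.List.slice current (some (i * T)) (some ((i + 1) * T)))]
    else
      ([0, 1, 2] : List Int).foldl
        (fun arr num => pvBacktrackA K T total fuel (current ++ [num]) arr) arrays

def generate_arrays_recursive (K : Int) (T : Int) : List (List (List Int)) :=
  if K * T > 8 then []  -- Python raises ValueError here (outside Pre_)
  else pvBacktrackA K T (K * T) ((K * T).toNat + 1) [] []

-- ===== PORT B =====
-- itertools.product([0,1,2], repeat=n) in lexicographic order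
def pvProd3 : Nat → List (List Int)
  | 0 => [[]]
  | n + 1 => ([0, 1, 2] : List Int).flatMap (fun d => (pvProd3 n).map (d :: ·))

def generate_arrays_recursive_alt (K : Int) (T : Int) : List (List (List Int)) :=
  if K * T > 8 then []  -- Python raises ValueError here (outside Pre_)
  else
    (pvProd3 (K * T).toNat).map
      (fun t => (PySem.List.pyRange 0 K 1).map
        (fun i => PySem.List.slice t (some (i * T)) (some ((i + 1) * T))))

-- ===== PRECONDITION & SPEC =====
-- Pre_ excludes K*T > 8 (A raises ValueError) and K*T < 0 (A's backtrack never reaches the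
-- negative target length and recurses until RecursionError); A returns normally everywhere else.
def Pre_generate_arrays_recursive (K : Int) (T : Int) : Prop := 0 ≤ K * T ∧ K * T ≤ 8
instance (K : Int) (T : Int) : Decidable (Pre_generate_arrays_recursive K T) := by
  unfold Pre_generate_arrays_recursive; infer_instance
def pvWitness_generate_arrays_recursive : Int × Int := (2, 3)

def Spec_generate_arrays_recursive (K : Int) (T : Int) (out : List (List (List Int))) : Prop := out = generate_arrays_recursive_alt K T
instance (K : Int) (T : Int) (out : List (List (List Int))) : Decidable (Spec_generate_arrays_recursive K T out) := by unfold Spec_generate_arrays_recursive; infer_instance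

-- ===== CLAIM (what is proved, stated in full; the proofs are below) =====
def Claim_equal_generate_arrays_recursive : Prop := ∀ (K : Int) (T : Int), Dom_generate_arrays_recursive K T → Pre_generate_arrays_recursive K T → Spec_generate_arrays_recursive K T (generate_arrays_recursive K T)

-- ===== LEMMAS AND PROOFS =====

-- The backtracking run from `current` with n choices left appends exactly the reshapes of
-- current ++ s for every s in pvProd3 n, in product order.
theorem pvBacktrackA_eq (K T : Int) (n : Nat) :
    ∀ (fuel : Nat) (current : List Int) (arrays : List (List (List Int))),
      n + 1 ≤ fuel →
      pvBacktrackA K T ((current.length : Int) + n) fuel current arrays =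
        arrays ++ (pvProd3 n).map
          (fun s => (PySem.List.pyRange 0 K 1).map
            (fun i => PySem.List.slice (current ++ s) (some (i * T)) (some ((i + 1) * T)))) := by
  induction n with
  | zero =>
    intro fuel current arrays hfuel
    obtain ⟨f, rfl⟩ : ∃ f, fuel = f + 1 := ⟨fuel - 1, by omega⟩
    simp [pvBacktrackA, pvProd3]
  | succ n ih =>
    intro fuel current arrays hfuel
    obtain ⟨f, rfl⟩ : ∃ f, fuel = f + 1 := ⟨fuel - 1, by omega⟩
    have hne : (current.length : Int) ≠ (current.length : Int) + (n + 1 : Nat) := by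
      push_cast; omega
    have hrec : ∀ (d : Int) (arr : List (List (List Int))),
        pvBacktrackA K T ((current.length : Int) + (n + 1 : Nat)) f (current ++ [d]) arr =
          arr ++ (pvProd3 n).map
            (fun s => (PySem.List.pyRange 0 K 1).map
              (fun i => PySem.List.slice (current ++ d :: s) (some (i * T)) (some ((i + 1) * T)))) := by
      intro d arr
      have h1 : (current.length : Int) + (n + 1 : Nat) = ((current ++ [d]).length : Int) + n := by
        simp; omega
      rw [h1, ih f (current ++ [d]) arr (by omega)]
      simp [List.append_assoc]
    simp only [pvBacktrackA, if_neg hne, List.foldl_cons, List.foldl_nil]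
    rw [hrec 0, hrec 1, hrec 2]
    simp [pvProd3, List.flatMap, List.map_map, List.append_assoc, Function.comp_def]

-- ===== VERDICT (by name: the statement is the Claim_ definition above) =====
theorem generate_arrays_recursive_spec : Claim_equal_generate_arrays_recursive := by
  intro K T _ hpre
  obtain ⟨h0, _⟩ := hpre
  unfold Spec_generate_arrays_recursive generate_arrays_recursive generate_arrays_recursive_alt
  split
  · rfl
  · have h1 : pvBacktrackA K T (K * T) ((K * T).toNat + 1) [] [] =
        pvBacktrackA K T ((([] : List Int).length : Int) + ((K * T).toNat : Nat))
          ((K * T).toNat + 1) [] [] := by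
      congr 1
      simp [Int.toNat_of_nonneg h0]
    rw [h1, pvBacktrackA_eq K T (K * T).toNat ((K * T).toNat + 1) [] [] (by omega)]
    simp
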